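-- pv_equiv track=rewrite | github.com/Axelitooo/adventofcode2023 | day12/main.py | start_larger
-- ===== SOURCE A (Python) =====
-- def start_larger(springs, clues, clue_index):
-- 	if clue_index == len(clues):
-- 		return True
-- 	else:
-- 		clue = clues[clue_index]
-- 	#parameters = springs+str(clue)
-- 	#if parameters in start_larger_dict.keys():
-- 		#calls_successful[0] += 1
-- 		#return start_larger_dict[parameters]
-- 	index = 0
-- 	while springs[index] == ".":
-- 		index += 1
-- 		if index == len(springs):
-- 			#start_larger_dict[parameters] = False
-- 			return False
-- 	start = index
-- 	while springs[index] != ".":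
-- 		index += 1
-- 		if index == len(springs):
-- 			#start_larger_dict[parameters] = True
-- 			return True
-- 	group = springs[start:index]
-- 	if "?" not in group:
-- 		if len(group) != clue:
-- 			#start_larger_dict[parameters] = False
-- 			return False
-- 		else:
-- 			return start_larger(springs[index:], clues, clue_index+1)
-- 	if "#" in group:
-- 		#start_larger_dict[parameters] = (len(group) >= clue)
-- 		return (len(group) >= clue)
-- 	#start_larger_dict[parameters] = True
-- 	return True
-- ===== SOURCE B (Python) =====
-- def start_larger(springs, clues, clue_index):
--     # stage 1: tokenize springs into maximal dot-free groups, left to right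
--     groups = []
--     cur = ""
--     for ch in springs:
--         if ch == ".":
--             if cur:
--                 groups.append(cur)
--                 cur = ""
--         else:
--             cur += ch
--     # stage 2: judge the closed groups against the clues
--     for group in groups:
--         if clue_index == len(clues):
--             return True
--         clue = clues[clue_index]
--         if "?" not in group:
--             if len(group) != clue:
--                 return False
--             clue_index += 1
--             continue
--         if "#" in group:
--             return len(group) >= clue
--         return True
--     if clue_index == len(clues):
--         return True
--     return cur != ""
-- ===== Notes on version B (the rewrite author's own statement) =====
-- stated objective: alternative
-- what changed: Replaces A's recursion on string suffixes (character-index scans plus a fresh slice per matched clue) by a two-stage pipeline: one pass tokenizes springs into its dot-free groups (plus an open trailing run), then a simple loop judges that group list against the clues with no further string scanning or slicing.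
import Mathlib
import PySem

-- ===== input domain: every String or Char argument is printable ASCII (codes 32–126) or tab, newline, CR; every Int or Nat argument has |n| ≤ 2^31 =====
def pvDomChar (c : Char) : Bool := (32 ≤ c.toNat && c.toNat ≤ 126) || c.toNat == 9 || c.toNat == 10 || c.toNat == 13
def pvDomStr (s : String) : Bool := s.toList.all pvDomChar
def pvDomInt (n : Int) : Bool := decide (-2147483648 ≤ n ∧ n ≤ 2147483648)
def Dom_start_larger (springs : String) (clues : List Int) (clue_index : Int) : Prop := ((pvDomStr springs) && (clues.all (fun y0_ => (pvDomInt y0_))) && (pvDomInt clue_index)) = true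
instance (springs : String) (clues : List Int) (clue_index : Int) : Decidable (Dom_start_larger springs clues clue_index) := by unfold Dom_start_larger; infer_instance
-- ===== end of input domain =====

-- B replaces A's suffix-recursion (index scans + a fresh slice per matched clue) by a two-stage
-- pipeline: tokenize springs into its dot-free groups once, then judge the groups against the
-- clues; same return value on Pre_. A's port carries a fuel argument that only totalizes the
-- clue_index recursion (the fuel (len(clues) - clue_index) + 1 is never exhausted inside Pre_).

-- ===== PORT A =====

-- A's first while loop: index = 0; while springs[index] == ".": index += 1; if index == len:
-- return False. `some index` = first non-'.' position, `none` = ran off the end.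
def findRunAux : List Char → Nat → Option Nat
  | [], _ => none
  | c :: rest, i => if c = '.' then findRunAux rest (i + 1) else some i

-- A's second while loop: while springs[index] != ".": index += 1; if index == len: return True.
-- Scans the suffix springs[start:], counting from `start`; `none` = ran off the end.
def findEndAux : List Char → Nat → Option Nat
  | [], _ => none
  | c :: rest, i => if c = '.' then some i else findEndAux rest (i + 1)

def startLargerA : Nat → List Char → List Int → Int → Bool
  | 0, _, _, _ => false   -- fuel never exhausted (see note above)
  | fuel + 1, cs, clues, ci =>
    if ci = (clues.length : Int) then true
    else
      match PySem.List.pyGet? clues ci with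
      | none => false   -- Python: clues[clue_index] raises IndexError (outside Pre_)
      | some clue =>
        match findRunAux cs 0 with
        | none => false
        | some start =>
          match findEndAux (cs.drop start) start with
          | none => true
          | some idx =>
            if (PySem.List.slice cs (some (start : Int)) (some (idx : Int))).contains '?' = false then
              if ((PySem.List.slice cs (some (start : Int)) (some (idx : Int))).length : Int) ≠ clue then false
              else startLargerA fuel (PySem.List.slice cs (some (idx : Int)) none) clues (ci + 1)
            else if (PySem.List.slice cs (some (start : Int)) (some (idx : Int))).contains '#' then
              decide (clue ≤ ((PySem.List.slice cs (some (start : Int)) (some (idx : Int))).length : Int))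
            else true

def start_larger (springs : String) (clues : List Int) (clue_index : Int) : Bool :=
  startLargerA (((clues.length : Int) - clue_index).toNat + 1) springs.toList clues clue_index

-- ===== PORT B =====

-- stage-1 loop body: `if ch == ".": if cur: groups.append(cur); cur = "" else: cur += ch`
def tokStep (st : List (List Char) × List Char) (c : Char) : List (List Char) × List Char :=
  if c = '.' then (if st.2 ≠ [] then (st.1 ++ [st.2], []) else st) else (st.1, st.2 ++ [c])

-- stage-2 `for group in groups` loop with its early returns; base case = the code after the loop
def judge : List (List Char) → List Int → Int → Bool → Bool
  | [], clues, ci, lastOpen => if ci = (clues.length : Int) then true else lastOpen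
  | g :: rest, clues, ci, lastOpen =>
    if ci = (clues.length : Int) then true
    else
      match PySem.List.pyGet? clues ci with
      | none => false   -- Python: clues[clue_index] raises IndexError (outside Pre_)
      | some clue =>
        if g.contains '?' = false then
          if ((g.length : Nat) : Int) ≠ clue then false
          else judge rest clues (ci + 1) lastOpen
        else if g.contains '#' then decide (clue ≤ ((g.length : Nat) : Int))
        else true

def start_larger_alt (springs : String) (clues : List Int) (clue_index : Int) : Bool :=
  let st := springs.toList.foldl tokStep ([], [])
  judge st.1 clues clue_index (decide (st.2 ≠ []))

-- ===== PRECONDITION & SPEC =====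
-- Pre_ excludes exactly the inputs where Python A raises IndexError: a clue_index outside
-- [-len(clues), len(clues)] (clues[clue_index] raises), and an empty springs string with a
-- clue still pending (springs[0] raises).
def Pre_start_larger (springs : String) (clues : List Int) (clue_index : Int) : Prop :=
  clue_index = (clues.length : Int) ∨
    (springs.toList ≠ [] ∧ -(clues.length : Int) ≤ clue_index ∧ clue_index < (clues.length : Int))
instance (springs : String) (clues : List Int) (clue_index : Int) : Decidable (Pre_start_larger springs clues clue_index) := by unfold Pre_start_larger; infer_instance
def pvWitness_start_larger : String × List Int × Int := ("#.??", [1, 2], 0)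

def Spec_start_larger (springs : String) (clues : List Int) (clue_index : Int) (out : Bool) : Prop := out = start_larger_alt springs clues clue_index
instance (springs : String) (clues : List Int) (clue_index : Int) (out : Bool) : Decidable (Spec_start_larger springs clues clue_index out) := by unfold Spec_start_larger; infer_instance

-- ===== CLAIM (what is proved, stated in full; the proofs are below) =====
def Claim_equal_start_larger : Prop := ∀ (springs : String) (clues : List Int) (clue_index : Int), Dom_start_larger springs clues clue_index → Pre_start_larger springs clues clue_index → Spec_start_larger springs clues clue_index (start_larger springs clues clue_index)

-- ===== LEMMAS AND PROOFS =====

theorem findRunAux_eq (l : List Char) (i : Nat) :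
    findRunAux l i =
      if l.dropWhile (fun c => c == '.') = [] then none
      else some (i + (l.takeWhile (fun c => c == '.')).length) := by
  induction l generalizing i with
  | nil => simp [findRunAux]
  | cons c rest ih =>
    by_cases hc : c = '.'
    · simp only [findRunAux, List.dropWhile_cons, List.takeWhile_cons, hc, beq_self_eq_true,
        if_pos]
      rw [ih (i + 1)]
      split
      · rfl
      · simp only [Option.some.injEq, List.length_cons]
        omega
    · simp [findRunAux, hc]

theorem findEndAux_eq (l : List Char) (i : Nat) :
    findEndAux l i =
      if l.dropWhile (fun c => !(c == '.')) = [] then none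
      else some (i + (l.takeWhile (fun c => !(c == '.'))).length) := by
  induction l generalizing i with
  | nil => simp [findEndAux]
  | cons c rest ih =>
    by_cases hc : c = '.'
    · simp [findEndAux, hc]
    · have hb : (!(c == '.')) = true := by simp [hc]
      simp only [findEndAux, if_neg hc, List.dropWhile_cons, List.takeWhile_cons, hb,
        if_true]
      rw [ih (i + 1)]
      split
      · rfl
      · simp only [Option.some.injEq, List.length_cons]
        omega

-- dots leave a state with empty cur unchanged
theorem foldl_tokStep_dots (l : List Char) (gs : List (List Char))
    (h : ∀ c ∈ l, c = '.') : l.foldl tokStep (gs, []) = (gs, []) := by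
  induction l with
  | nil => rfl
  | cons c rest ih =>
    have hc : c = '.' := h c (by simp)
    simp only [List.foldl_cons, tokStep, hc]
    exact ih (fun c hm => h c (by simp [hm]))

-- non-dots only extend cur
theorem foldl_tokStep_nondots (l : List Char) (gs : List (List Char)) (cur : List Char)
    (h : ∀ c ∈ l, c ≠ '.') : l.foldl tokStep (gs, cur) = (gs, cur ++ l) := by
  induction l generalizing cur with
  | nil => simp
  | cons c rest ih =>
    have hc : c ≠ '.' := h c (by simp)
    simp only [List.foldl_cons, tokStep, if_neg hc]
    rw [ih (cur ++ [c]) (fun c hm => h c (by simp [hm]))]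
    simp

-- already-closed groups ride along in front
theorem foldl_tokStep_prefix (l : List Char) (gs : List (List Char)) (cur : List Char) :
    l.foldl tokStep (gs, cur) =
      (gs ++ (l.foldl tokStep ([], cur)).1, (l.foldl tokStep ([], cur)).2) := by
  induction l generalizing gs cur with
  | nil => simp
  | cons c rest ih =>
    by_cases hc : c = '.'
    · by_cases hcur : cur = []
      · subst hcur
        simp only [List.foldl_cons, tokStep, hc, ne_eq, not_true_eq_false]
        exact ih gs []
      · simp only [List.foldl_cons, tokStep, hc, ne_eq, hcur, not_false_eq_true, if_pos]
        simp only [List.nil_append]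
        rw [ih (gs ++ [cur]) [], ih [cur] []]
        simp
    · simp only [List.foldl_cons, tokStep, if_neg hc]
      exact ih gs (cur ++ [c])

theorem dropWhile_head_false {α : Type} (p : α → Bool) :
    ∀ (l : List α) (c : α) (rest : List α), l.dropWhile p = c :: rest → p c = false
  | [], _, _, h => by simp at h
  | a :: l, c, rest, h => by
    rw [List.dropWhile_cons] at h
    by_cases ha : p a = true
    · rw [if_pos ha] at h
      exact dropWhile_head_false p l c rest h
    · rw [if_neg ha] at h
      injection h with h1 h2
      rw [← h1]
      simpa using ha

theorem judge_len (G : List (List Char)) (clues : List Int) (lo : Bool) :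
    judge G clues (clues.length : Int) lo = true := by
  cases G <;> simp [judge]

theorem main_eq (fuel : Nat) (cs : List Char) (clues : List Int) (ci : Int)
    (hlo : -(clues.length : Int) ≤ ci) (hhi : ci ≤ (clues.length : Int))
    (hfuel : ((clues.length : Int) - ci).toNat < fuel) :
    startLargerA fuel cs clues ci =
      judge (cs.foldl tokStep ([], [])).1 clues ci
        (decide ((cs.foldl tokStep ([], [])).2 ≠ [])) := by
  induction fuel generalizing cs ci with
  | zero => omega
  | succ fuel ih =>
    by_cases hci : ci = (clues.length : Int)
    · rw [hci, judge_len]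
      simp [startLargerA]
    · have hlt : ci < (clues.length : Int) := lt_of_le_of_ne hhi hci
      obtain ⟨clue, hget⟩ : ∃ clue, PySem.List.pyGet? clues ci = some clue := by
        cases hg : PySem.List.pyGet? clues ci with
        | none =>
          rw [PySem.List.pyGet?_eq_none_iff] at hg
          exact absurd ⟨hlo, hlt⟩ hg
        | some v => exact ⟨v, rfl⟩
      set pd : Char → Bool := fun c => c == '.' with hpd
      set pn : Char → Bool := fun c => !(c == '.') with hpn
      have hsplit1 : cs.takeWhile pd ++ cs.dropWhile pd = cs := List.takeWhile_append_dropWhile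
      have hdots : ∀ c ∈ cs.takeWhile pd, c = '.' := by
        intro c hm
        simpa [hpd] using List.mem_takeWhile_imp hm
      have htok1 : cs.foldl tokStep ([], []) = (cs.dropWhile pd).foldl tokStep ([], []) := by
        conv_lhs => rw [← hsplit1]
        rw [List.foldl_append, foldl_tokStep_dots _ _ hdots]
      rw [htok1]
      simp only [startLargerA, if_neg hci, hget]
      rw [findRunAux_eq]
      by_cases hrest1 : cs.dropWhile pd = []
      · rw [if_pos hrest1, hrest1]
        simp [judge, hci]
      · rw [if_neg hrest1]
        dsimp only
        set rest1 : List Char := cs.dropWhile pd with hrest1def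
        set s : Nat := (cs.takeWhile pd).length with hs
        have hdropcs : cs.drop s = rest1 := by
          conv_lhs => rw [← hsplit1]
          simp [hs]
        rw [Nat.zero_add, hdropcs, findEndAux_eq]
        have hnd : ∀ c ∈ rest1.takeWhile pn, c ≠ '.' := by
          intro c hm
          simpa [hpn] using List.mem_takeWhile_imp hm
        by_cases hrest2 : rest1.dropWhile pn = []
        · -- run reaches the end of the string: A returns True; B sees one open trailing run
          rw [if_pos hrest2]
          have hall : rest1.takeWhile pn = rest1 := by
            conv_rhs => rw [← List.takeWhile_append_dropWhile (p := pn) (l := rest1)]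
            rw [hrest2, List.append_nil]
          have htok2 : rest1.foldl tokStep ([], []) = ([], rest1) := by
            rw [foldl_tokStep_nondots _ _ _ (by rw [← hall] at hrest1 ⊢; exact hnd)]
            rfl
          rw [htok2]
          simp only [judge, if_neg hci]
          rw [eq_comm, decide_eq_true_eq]
          exact hrest1
        · rw [if_neg hrest2]
          set g : List Char := rest1.takeWhile pn with hg
          set rest2 : List Char := rest1.dropWhile pn with hrest2def
          have hsplit2 : g ++ rest2 = rest1 := List.takeWhile_append_dropWhile
          -- the group A slices out is exactly g
          have hslice : PySem.List.slice cs (some (s : Int)) (some ((s + g.length : Nat) : Int)) = g := by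
            have hcast : ((s + g.length : Nat) : Int) = ((s : Nat) : Int) + ((g.length : Nat) : Int) := by
              push_cast
              ring
            rw [hcast, PySem.List.slice_natCast_add, hdropcs, ← hsplit2]
            exact List.take_left
          have hdrop2 : PySem.List.slice cs (some ((s + g.length : Nat) : Int)) none = rest2 := by
            rw [PySem.List.slice_from_natCast]
            have h1 : List.drop (s + g.length) cs = List.drop g.length (List.drop s cs) := by
              rw [List.drop_drop, Nat.add_comm]
            rw [h1, hdropcs, ← hsplit2, List.drop_left]
          -- g is nonempty, and rest2 starts with a dot
          obtain ⟨c, rest, hcons⟩ := List.exists_cons_of_ne_nil hrest1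
          have hcd : pd c = false := by
            refine dropWhile_head_false pd cs c rest ?_
            rw [← hrest1def]
            exact hcons
          have hgne : g ≠ [] := by
            have hpnc : pn c = true := by
              simp only [hpn, hpd] at hcd ⊢
              simp [hcd]
            rw [hg, hcons, List.takeWhile_cons, hpnc]
            simp
          obtain ⟨d, rest2', hr2⟩ := List.exists_cons_of_ne_nil hrest2
          have hd : d = '.' := by
            have h1 : pn d = false := by
              refine dropWhile_head_false pn rest1 d rest2' ?_
              rw [← hrest2def]
              exact hr2
            simpa [hpn] using h1
          -- tokenizing rest1 yields g followed by the tokens of rest2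
          have htokrest2 : rest2.foldl tokStep ([], []) = rest2'.foldl tokStep ([], []) := by
            have hstep : tokStep (([] : List (List Char)), ([] : List Char)) d = ([], []) := by
              simp [tokStep, hd]
            rw [hr2, List.foldl_cons, hstep]
          have htok2 : rest1.foldl tokStep ([], []) =
              (g :: (rest2.foldl tokStep ([], [])).1, (rest2.foldl tokStep ([], [])).2) := by
            conv_lhs => rw [← hsplit2]
            rw [List.foldl_append, foldl_tokStep_nondots _ _ _ hnd, List.nil_append]
            rw [hr2, List.foldl_cons]
            rw [show tokStep ([], g) d = ([g], []) from by simp [tokStep, hd, hgne]]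
            rw [foldl_tokStep_prefix rest2' [g] []]
            rw [List.foldl_cons]
            rw [show tokStep (([] : List (List Char)), ([] : List Char)) d = ([], []) from by
              simp [tokStep, hd]]
            simp
          rw [htok2]
          have hrec := ih rest2 (ci + 1) (by omega) (by omega) (by omega)
          simp only [judge, if_neg hci, hget, hslice, hdrop2, hrec]

-- ===== VERDICT (by name: the statement is the Claim_ definition above) =====
theorem start_larger_spec : Claim_equal_start_larger := by
  intro springs clues ci _ hpre
  unfold Spec_start_larger start_larger start_larger_alt
  have hb : -(clues.length : Int) ≤ ci ∧ ci ≤ (clues.length : Int) := by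
    rcases hpre with h | ⟨_, h1, h2⟩
    · constructor <;> omega
    · constructor <;> omega
  exact main_eq _ springs.toList clues ci hb.1 hb.2 (by omega)
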